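-- pv_equiv track=rewrite | github.com/l1t-w1n/Algo | Algo.py | naif
-- ===== SOURCE A (Python) =====
-- import itertools as it
--
-- def naif(t):
--     som=0
--     i=sum([list(map(list, it.combinations(t, i))) for i in range(len(t) + 1)], [])
--     for el in i:
--     	s1=0
--     	for n in el:
--     		s1+=n
--     	if s1>som:
--     		som=s1
--     return som
-- ===== SOURCE B (Python) =====
-- def naif(t):
--     som = 0
--     for x in t:
--         if x > 0:
--             som += x
--     return som
-- ===== Notes on version B (the rewrite author's own statement) =====
-- stated objective: faster
-- what changed: Replaces the enumeration of all 2^n subsets (via itertools.combinations) and a max over their sums with a single pass summing the positive elements, which is the maximum subset sum.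
import Mathlib
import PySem

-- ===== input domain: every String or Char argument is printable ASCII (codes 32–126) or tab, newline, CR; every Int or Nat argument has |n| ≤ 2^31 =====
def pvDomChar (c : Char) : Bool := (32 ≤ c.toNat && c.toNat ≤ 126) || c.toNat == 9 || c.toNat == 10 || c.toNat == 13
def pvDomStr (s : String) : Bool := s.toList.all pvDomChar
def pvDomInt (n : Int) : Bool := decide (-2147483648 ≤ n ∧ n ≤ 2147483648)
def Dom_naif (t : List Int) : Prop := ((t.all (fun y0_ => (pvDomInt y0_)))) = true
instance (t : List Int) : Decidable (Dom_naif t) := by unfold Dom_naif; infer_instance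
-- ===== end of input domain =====

-- B replaces A's enumeration of all subsets with one pass summing the positive elements (objective: faster).

-- ===== PORT A =====
def naif (t : List Int) : Int :=
  let i : List (List Int) :=
    ((PySem.List.pyRange 0 ((t.length : Int) + 1) 1).map
      (fun r => (PySem.List.combinations t r.toNat).map (fun c => c))).foldl (· ++ ·) []
  i.foldl (fun som el =>
    let s1 := el.foldl (fun s1 n => s1 + n) 0
    if s1 > som then s1 else som) 0

-- ===== PORT B =====
def naif_alt (t : List Int) : Int :=
  t.foldl (fun som x => if x > 0 then som + x else som) 0

-- ===== PRECONDITION & SPEC =====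
def Spec_naif (t : List Int) (out : Int) : Prop := out = naif_alt t
instance (t : List Int) (out : Int) : Decidable (Spec_naif t out) := by unfold Spec_naif; infer_instance

-- ===== CLAIM (what is proved, stated in full; the proofs are below) =====
def Claim_equal_naif : Prop := ∀ (t : List Int), Dom_naif t → Spec_naif t (naif t)

-- ===== LEMMAS AND PROOFS =====

-- B's fold equals the sum of the positive elements
theorem alt_eq_filter_sum (t : List Int) (a : Int) :
    t.foldl (fun som x => if x > 0 then som + x else som) a
      = a + (t.filter (fun x => decide (0 < x))).sum := by
  induction t generalizing a with
  | nil => simp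
  | cons x xs ih =>
    by_cases h : 0 < x <;> simp [h, ih, add_assoc]

theorem pv_inner_sum (el : List Int) (a : Int) :
    el.foldl (fun s n => s + n) a = a + el.sum := by
  induction el generalizing a with
  | nil => simp
  | cons x xs ih => simp [ih, add_assoc]

-- any sublist's sum is at most the sum of positives
theorem sublist_sum_le (c t : List Int) (h : c.Sublist t) :
    c.sum ≤ (t.filter (fun x => decide (0 < x))).sum := by
  induction h with
  | slnil => simp
  | cons a _ ih =>
    rename_i l₁ l₂ _
    by_cases hp : 0 < a <;> simp [hp] <;> omega
  | cons₂ a _ ih =>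
    rename_i l₁ l₂ _
    by_cases hp : 0 < a <;> simp [hp] <;> omega

theorem filter_sum_nonneg (t : List Int) :
    0 ≤ (t.filter (fun x => decide (0 < x))).sum := by
  induction t with
  | nil => simp
  | cons x xs ih =>
    by_cases h : 0 < x <;> simp [h] <;> omega

-- upper bound on A's fold
theorem fold_le (L : List (List Int)) (a P : Int) (ha : a ≤ P)
    (hL : ∀ el ∈ L, el.sum ≤ P) :
    L.foldl (fun som el =>
      let s1 := el.foldl (fun s1 n => s1 + n) 0
      if s1 > som then s1 else som) a ≤ P := by
  induction L generalizing a with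
  | nil => exact ha
  | cons el L ih =>
    simp only [List.foldl_cons]
    apply ih
    · have := hL el (by simp)
      simp only [pv_inner_sum, zero_add]
      split <;> omega
    · intro e he; exact hL e (by simp [he])

-- lower bound: any member's sum is ≤ A's fold
theorem mem_le_fold (L : List (List Int)) (a : Int) (el : List Int) (hel : el ∈ L) :
    el.sum ≤ L.foldl (fun som el =>
      let s1 := el.foldl (fun s1 n => s1 + n) 0
      if s1 > som then s1 else som) a := by
  induction L generalizing a with
  | nil => cases hel
  | cons e L ih =>
    simp only [List.foldl_cons]
    rcases List.mem_cons.mp hel with h | h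
    · subst h
      have hmono : ∀ (M : List (List Int)) (b c : Int), b ≤ c →
          b ≤ M.foldl (fun som el =>
            let s1 := el.foldl (fun s1 n => s1 + n) 0
            if s1 > som then s1 else som) c := by
        intro M
        induction M with
        | nil => intro b c h; exact h
        | cons m M ihm =>
          intro b c h
          simp only [List.foldl_cons]
          apply ihm
          split <;> omega
      apply hmono
      simp only [pv_inner_sum, zero_add]
      split <;> omega
    · exact ih _ h

theorem naif_spec : Claim_equal_naif := by
  unfold Claim_equal_naif Spec_naif
  intro t _
  unfold naif naif_alt
  rw [PySem.List.foldl_append_eq_flatten, List.nil_append, alt_eq_filter_sum, zero_add]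
  set q := t.filter (fun x => decide (0 < x)) with hq
  set L := ((PySem.List.pyRange 0 ((t.length : Int) + 1) 1).map
      (fun r => (PySem.List.combinations t r.toNat).map (fun c => c))).flatten with hL
  have hmemL : ∀ el ∈ L, el.Sublist t := by
    intro el hel
    rw [hL, List.mem_flatten] at hel
    obtain ⟨l, hl, hel⟩ := hel
    rw [List.mem_map] at hl
    obtain ⟨r, _, rfl⟩ := hl
    rw [List.mem_map] at hel
    obtain ⟨c, hc, rfl⟩ := hel
    exact PySem.List.sublist_of_mem_combinations hc
  have hqmem : q ∈ L := by
    rw [hL, List.mem_flatten]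
    refine ⟨(PySem.List.combinations t q.length).map (fun c => c), ?_, ?_⟩
    · rw [List.mem_map]
      refine ⟨(q.length : Int), ?_, ?_⟩
      · rw [PySem.List.mem_pyRange_one]
        have : q.length ≤ t.length := List.Sublist.length_le (List.filter_sublist)
        omega
      · rw [Int.toNat_natCast]
    · rw [List.mem_map]
      refine ⟨q, ?_, rfl⟩
      rw [PySem.List.mem_combinations_iff]
      exact ⟨List.filter_sublist, rfl⟩
  apply le_antisymm
  · apply fold_le
    · exact filter_sum_nonneg t
    · intro el hel
      exact sublist_sum_le el t (hmemL el hel)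
  · exact mem_le_fold L 0 q hqmem
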